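-- pv_equiv track=rewrite | github.com/Yuhuaihy/Natrural-Language-Processing | Yu_Huai_assignment1.py | has_most_consonants
-- ===== SOURCE A (Python) =====
-- def has_most_consonants(text):
--     # replace the body of this function, it is just some stupid code that gets
--     # it right for th eexamples mentioned above
--     if text == '':
--         return []
--     else:
--         s = text.split()
--         result = []
--         letters = set([chr(i) for i in range(97,123)])
--         contsonants = letters - set('aeoui')
--         max_count = 0
--         for word in s:
--             count = 0
--             for i in word:
--                 if i.lower() in contsonants:
--                     count += 1
--             if count > max_count:
--                 max_count = count
--                 result = [word]
--             elif count == max_count: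
--                 result.append(word)
--
--
--         return result
-- ===== SOURCE B (Python) =====
-- def has_most_consonants(text):
--     consonants = set("bcdfghjklmnpqrstvwxyz")
--     words = text.split()
--     counts = [sum(1 for ch in w if ch.lower() in consonants) for w in words]
--     m = max(counts, default=0)
--     return [w for w, c in zip(words, counts) if c == m]
-- ===== Notes on version B (the rewrite author's own statement) =====
-- stated objective: simpler
-- what changed: Replaces A's single pass with a running max and incrementally rebuilt result list (and its hand-built letters-minus-vowels set) by a two-pass count-then-max-then-filter shape over a literal consonant set.
import Mathlib
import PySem

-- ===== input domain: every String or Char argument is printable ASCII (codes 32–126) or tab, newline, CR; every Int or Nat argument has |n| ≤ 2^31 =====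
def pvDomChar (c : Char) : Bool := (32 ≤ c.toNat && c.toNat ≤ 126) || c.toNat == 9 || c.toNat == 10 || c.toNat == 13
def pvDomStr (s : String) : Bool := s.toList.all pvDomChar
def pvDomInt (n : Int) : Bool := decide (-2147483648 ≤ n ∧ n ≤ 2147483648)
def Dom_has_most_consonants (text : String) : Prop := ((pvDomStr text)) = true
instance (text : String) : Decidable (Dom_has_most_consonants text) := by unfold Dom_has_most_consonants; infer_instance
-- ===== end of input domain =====

-- B replaces A's running-max single pass (with its incrementally rebuilt result list and hand-built
-- letters-minus-vowels set) by a two-pass count-then-max-then-filter shape; objective: simpler.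

-- ===== PORT A =====
-- letters = set(chr(i) for i in range(97,123));  contsonants = letters - set('aeoui')
def aLetters : PySem.Set Char :=
  PySem.Set.ofList ((PySem.List.pyRange 97 123 1).map (fun i => Char.ofNat i.toNat))
def aConsonants : PySem.Set Char := PySem.Set.diff aLetters (PySem.Set.ofList "aeoui".toList)

def has_most_consonants (text : String) : List String :=
  if text = "" then []
  else
    let s := PySem.Str.split₀ text
    let r := s.foldl (fun (st : Int × List String) word =>
      let count := word.toList.foldl
        (fun c i => if PySem.Set.contains aConsonants (PySem.Chars.lowerChar i) then c + 1 else c)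
        (0 : Int)
      if count > st.1 then (count, [word])
      else if count = st.1 then (st.1, st.2 ++ [word])
      else st) ((0 : Int), ([] : List String))
    r.2

-- ===== PORT B =====
def bConsonants : PySem.Set Char := PySem.Set.ofList "bcdfghjklmnpqrstvwxyz".toList

def has_most_consonants_alt (text : String) : List String :=
  let words := PySem.Str.split₀ text
  let counts := words.map (fun w =>
    ((w.toList.countP (fun ch => PySem.Set.contains bConsonants (PySem.Chars.lowerChar ch)) : Nat) : Int))
  let m := PySem.List.maxD counts (fun x => x) 0
  ((words.zip counts).filter (fun p => p.2 == m)).map Prod.fst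

-- ===== PRECONDITION & SPEC =====
def Spec_has_most_consonants (text : String) (out : List String) : Prop := out = has_most_consonants_alt text
instance (text : String) (out : List String) : Decidable (Spec_has_most_consonants text out) := by unfold Spec_has_most_consonants; infer_instance

-- ===== CLAIM (what is proved, stated in full; the proofs are below) =====
def Claim_equal_has_most_consonants : Prop := ∀ (text : String), Dom_has_most_consonants text → Spec_has_most_consonants text (has_most_consonants text)

-- ===== LEMMAS AND PROOFS =====

-- the two consonant sets are the same list of characters
theorem cons_sets_eq : aConsonants = bConsonants := by decide

-- A's inner character loop is a countP
theorem countA_eq (p : Char → Bool) (cs : List Char) :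
    cs.foldl (fun c i => if p i then c + 1 else c) (0 : Int) = ((cs.countP p : Nat) : Int) := by
  simpa using PySem.List.foldl_count_if p cs 0

-- A's word loop in closed form: running max, and the words whose count equals it
theorem loopA (cnt : String → Int) (ws : List String) : ∀ (m : Int) (r : List String),
    ws.foldl (fun (st : Int × List String) word =>
      let count := cnt word
      if count > st.1 then (count, [word])
      else if count = st.1 then (st.1, st.2 ++ [word])
      else st) (m, r)
    = (ws.foldl (fun a w => max a (cnt w)) m,
       (if m < ws.foldl (fun a w => max a (cnt w)) m then [] else r)
         ++ ws.filter (fun w => cnt w == ws.foldl (fun a w => max a (cnt w)) m)) := by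
  induction ws with
  | nil => intro m r; simp
  | cons w t ih =>
    intro m r
    simp only [List.foldl_cons, List.filter_cons]
    have hle := (PySem.List.le_foldl_max (t.map cnt) (max m (cnt w))).1
    rw [List.foldl_map] at hle
    by_cases h1 : cnt w > m
    · rw [if_pos h1]
      rw [ih (cnt w) [w]]
      have hmax : max m (cnt w) = cnt w := by omega
      simp only [hmax] at hle ⊢
      rw [Prod.mk.injEq]
      refine ⟨rfl, ?_⟩
      rw [if_pos (show m < t.foldl (fun a w => max a (cnt w)) (cnt w) by omega)]
      generalize hM : t.foldl (fun a w => max a (cnt w)) (cnt w) = M at hle ⊢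
      by_cases h2 : cnt w = M
      · simp [h2]
      · rw [if_pos (show cnt w < M by omega)]
        simp [beq_eq_false_iff_ne.mpr h2]
    · rw [if_neg h1]
      have hmax : max m (cnt w) = m := by omega
      simp only [hmax] at hle
      by_cases h2 : cnt w = m
      · rw [if_pos h2, ih m (r ++ [w])]; simp only [hmax]
        rw [Prod.mk.injEq]
        refine ⟨rfl, ?_⟩
        generalize hM : t.foldl (fun a w => max a (cnt w)) m = M at hle ⊢
        by_cases h3 : m < M
        · rw [if_pos h3, if_pos h3]
          simp [beq_eq_false_iff_ne.mpr (show cnt w ≠ M by omega)]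
        · rw [if_neg h3, if_neg h3]
          simp [show cnt w = M by omega]
      · rw [if_neg h2, ih m r]; simp only [hmax]
        rw [Prod.mk.injEq]
        refine ⟨rfl, ?_⟩
        generalize hM : t.foldl (fun a w => max a (cnt w)) m = M at hle ⊢
        simp [beq_eq_false_iff_ne.mpr (show cnt w ≠ M by omega)]

-- max(xs, default=0) equals the running max from 0 when all elements are nonnegative
theorem maxD_eq_foldl (xs : List Int) (h : ∀ x ∈ xs, 0 ≤ x) :
    PySem.List.maxD xs (fun x => x) 0 = xs.foldl max 0 := by
  cases xs with
  | nil => rfl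
  | cons x t =>
    have hx : 0 ≤ x := h x (by simp)
    simp only [PySem.List.maxD, PySem.List.max?_id_cons, Option.getD_some, List.foldl_cons]
    rw [show max 0 x = x by omega]

-- filtering the zip of words with their counts is filtering the words
theorem zip_filter_map (cnt : String → Int) (m : Int) (ws : List String) :
    (((ws.zip (ws.map cnt)).filter (fun p => p.2 == m)).map Prod.fst)
      = ws.filter (fun w => cnt w == m) := by
  induction ws with
  | nil => rfl
  | cons w t ih =>
    simp only [List.map_cons, List.zip_cons_cons, List.filter_cons]
    by_cases h : (cnt w == m) = true
    · simp [h, ih]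
    · simp [h, ih]

-- ===== VERDICT (by name: the statement is the Claim_ definition above) =====
theorem has_most_consonants_spec : Claim_equal_has_most_consonants := by
  intro text _
  unfold Spec_has_most_consonants has_most_consonants has_most_consonants_alt
  by_cases ht : text = ""
  · subst ht; decide
  · rw [if_neg ht]
    set cnt : String → Int := fun w =>
      ((w.toList.countP (fun ch => PySem.Set.contains bConsonants (PySem.Chars.lowerChar ch)) : Nat) : Int)
      with hcnt
    have hstep : ∀ w : String,
        w.toList.foldl (fun c i => if PySem.Set.contains aConsonants (PySem.Chars.lowerChar i) then c + 1 else c) (0 : Int)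
          = cnt w := by
      intro w
      rw [cons_sets_eq, countA_eq]
    have hA := loopA cnt (PySem.Str.split₀ text) 0 []
    simp only [hstep]
    rw [hA]
    have hnn : ∀ x ∈ (PySem.Str.split₀ text).map cnt, (0:Int) ≤ x := by
      intro x hx
      obtain ⟨w, _, rfl⟩ := List.mem_map.mp hx
      positivity
    rw [maxD_eq_foldl _ hnn, List.foldl_map, zip_filter_map]
    simp
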